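-- pv_equiv track=rewrite | github.com/RohanLala04/ai-agents-projects | go-ai-agent/little_go_agent.py | has_liberty
-- ===== SOURCE A (Python) =====
-- SIZE = 5
--
-- EMPTY = 0
--
-- DX = [1, 0, -1, 0]
--
-- DY = [0, 1, 0, -1]
--
-- def has_liberty(board, i, j, color):
--     stack = [(i, j)]
--     visited = set()
--
--     while stack:
--         curr = stack.pop()
--         visited.add(curr)
--
--         for k in range(len(DX)):
--             ni = curr[0] + DX[k]
--             nj = curr[1] + DY[k]
--             if 0 <= ni < SIZE and 0 <= nj < SIZE:
--                 if (ni, nj) in visited: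
--                     continue
--                 elif board[ni][nj] == EMPTY:
--                     return True
--                 elif board[ni][nj] == color and (ni, nj) not in visited:
--                     stack.append((ni, nj))
--
--     return False
-- ===== SOURCE B (Python) =====
-- SIZE = 5
--
-- EMPTY = 0
--
-- def has_liberty(board, i, j, color):
--     visited = set()
--
--     def dfs(ci, cj):
--         visited.add((ci, cj))
--         for di, dj in ((1, 0), (0, 1), (-1, 0), (0, -1)):
--             ni, nj = ci + di, cj + dj
--             if 0 <= ni < SIZE and 0 <= nj < SIZE and (ni, nj) not in visited:
--                 if board[ni][nj] == EMPTY: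
--                     return True
--                 if board[ni][nj] == color and dfs(ni, nj):
--                     return True
--         return False
--
--     return dfs(i, j)
-- ===== Notes on version B (the rewrite author's own statement) =====
-- stated objective: alternative
-- what changed: Replaced the explicit stack/worklist flood fill (which pushes duplicates and marks cells visited on pop) with a recursive DFS closure that marks cells visited on entry and short-circuits on the first empty neighbour.
-- outside the precondition, e.g. on has_liberty([[5, 0], [5, 5]], 0, 0, 5): A returns True, B raises IndexError; on has_liberty([[1]], 0, 0, 1): A raises IndexError, B raises IndexError
import Mathlib
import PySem

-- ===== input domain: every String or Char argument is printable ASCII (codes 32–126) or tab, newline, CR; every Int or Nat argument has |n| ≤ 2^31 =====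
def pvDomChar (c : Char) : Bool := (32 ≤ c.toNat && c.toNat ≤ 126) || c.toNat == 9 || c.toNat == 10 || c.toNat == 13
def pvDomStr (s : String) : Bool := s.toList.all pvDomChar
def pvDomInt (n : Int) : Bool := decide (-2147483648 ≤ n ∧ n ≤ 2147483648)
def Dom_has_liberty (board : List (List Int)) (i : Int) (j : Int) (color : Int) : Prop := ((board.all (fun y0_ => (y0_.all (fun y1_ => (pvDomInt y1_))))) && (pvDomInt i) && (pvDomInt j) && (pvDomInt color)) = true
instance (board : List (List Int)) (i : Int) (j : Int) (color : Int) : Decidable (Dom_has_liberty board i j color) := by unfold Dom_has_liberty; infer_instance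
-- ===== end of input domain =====

-- B replaces A's explicit-stack flood fill (marks on pop, pushes duplicates) by a recursive
-- DFS that marks cells visited on entry; return value only, same Boolean on every input in Pre_.

-- ===== PORT A =====
def pvSIZE : Int := 5
def pvEMPTY : Int := 0
def pvDX : List Int := [1, 0, -1, 0]
def pvDY : List Int := [0, 1, 0, -1]

-- board[ni][nj]; exact wherever Python's access is in range (Pre_ keeps it in range; the
-- default 7 is never read inside Pre_, indices at access points are within 0..4)
def pvCell (board : List (List Int)) (ni nj : Int) : Int :=
  (PySem.List.pyGet? ((PySem.List.pyGet? board ni).getD []) nj).getD 7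

-- 0 <= ni < SIZE and 0 <= nj < SIZE
def pvInGrid (ni nj : Int) : Bool := decide (0 ≤ ni ∧ ni < pvSIZE ∧ 0 ≤ nj ∧ nj < pvSIZE)

-- the `for k in range(len(DX))` body of A: `none` = `return True`, `some acc` = the cells
-- appended to the stack during the scan (head = appended last)
def scanA (board : List (List Int)) (color : Int) (v : PySem.Set (Int × Int)) (curr : Int × Int) :
    List Nat → List (Int × Int) → Option (List (Int × Int))
  | [], acc => some acc
  | k :: ks, acc =>
    let ni := curr.1 + pvDX.getD k 0
    let nj := curr.2 + pvDY.getD k 0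
    if pvInGrid ni nj then
      if PySem.Set.contains v (ni, nj) then scanA board color v curr ks acc
      else if pvCell board ni nj == pvEMPTY then none
      else if pvCell board ni nj == color && !(PySem.Set.contains v (ni, nj)) then
        scanA board color v curr ks ((ni, nj) :: acc)
      else scanA board color v curr ks acc
    else scanA board color v curr ks acc

-- the `while stack` loop of A (fuel-guarded; 1000 is proved sufficient below)
def loopA (board : List (List Int)) (color : Int) :
    Nat → List (Int × Int) → PySem.Set (Int × Int) → Option Bool
  | 0, _, _ => none
  | _ + 1, [], _ => some false
  | f + 1, curr :: rest, v =>
    let v' := PySem.Set.add v curr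
    match scanA board color v' curr (List.range 4) [] with
    | none => some true
    | some pushes => loopA board color f (pushes ++ rest) v'

def has_liberty (board : List (List Int)) (i : Int) (j : Int) (color : Int) : Bool :=
  (loopA board color 1000 [(i, j)] PySem.Set.empty).getD false

-- ===== PORT B =====
def pvOFFS : List (Int × Int) := [(1, 0), (0, 1), (-1, 0), (0, -1)]

mutual
-- B's inner `dfs`: mark on entry, then scan the four offsets (fuel-guarded; 100 is proved sufficient)
def dfsB (board : List (List Int)) (color : Int) :
    Nat → PySem.Set (Int × Int) → Int × Int → Option (Bool × PySem.Set (Int × Int))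
  | 0, _, _ => none
  | f + 1, v, c => scanB board color f (PySem.Set.add v c) c pvOFFS
  termination_by f v c => (f, 0, 0)

-- B's `for di, dj in ...` loop, threading the (mutated) visited set
def scanB (board : List (List Int)) (color : Int) :
    Nat → PySem.Set (Int × Int) → Int × Int → List (Int × Int) → Option (Bool × PySem.Set (Int × Int))
  | _, v, _, [] => some (false, v)
  | f, v, c, d :: ds =>
    let ni := c.1 + d.1
    let nj := c.2 + d.2
    if pvInGrid ni nj && !(PySem.Set.contains v (ni, nj)) then
      if pvCell board ni nj == pvEMPTY then some (true, v)
      else if pvCell board ni nj == color then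
        match dfsB board color f v (ni, nj) with
        | none => none
        | some (true, v2) => some (true, v2)
        | some (false, v2) => scanB board color f v2 c ds
      else scanB board color f v c ds
    else scanB board color f v c ds
  termination_by f v c ds => (f, 1, ds.length)
end

def has_liberty_alt (board : List (List Int)) (i : Int) (j : Int) (color : Int) : Bool :=
  match dfsB board color 100 PySem.Set.empty (i, j) with
  | some (b, _) => b
  | none => false

-- ===== PRECONDITION & SPEC =====
def preNbrs (i j : Int) : List (Int × Int) := [(i + 1, j), (i, j + 1), (i - 1, j), (i, j - 1)]

-- Pre_ excludes boards that do not fully cover the fixed 5×5 grid (except when the flood fill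
-- provably makes no board access, or stops within the first readable neighbour ring): on such
-- boards whether A returns or raises IndexError depends on its incidental visit order, and a
-- re-implementation with another order may raise where A returns.
def Pre_has_liberty (board : List (List Int)) (i : Int) (j : Int) (color : Int) : Prop :=
  (5 ≤ board.length ∧ ∀ r ∈ board.take 5, 5 ≤ r.length)
  ∨ (∀ n ∈ preNbrs i j, ¬ (0 ≤ n.1 ∧ n.1 < 5 ∧ 0 ≤ n.2 ∧ n.2 < 5))
  ∨ (∀ n ∈ preNbrs i j, (0 ≤ n.1 ∧ n.1 < 5 ∧ 0 ≤ n.2 ∧ n.2 < 5) →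
      (n.1.toNat < board.length ∧ n.2.toNat < (board.getD n.1.toNat []).length ∧
        ((board.getD n.1.toNat []).getD n.2.toNat 0 = 0 ∨ (board.getD n.1.toNat []).getD n.2.toNat 0 ≠ color)))
instance (board : List (List Int)) (i : Int) (j : Int) (color : Int) : Decidable (Pre_has_liberty board i j color) := by
  unfold Pre_has_liberty; infer_instance

def pvWitness_has_liberty : List (List Int) × Int × Int × Int :=
  ([[1, 1, 1, 1, 1], [1, 1, 1, 1, 1], [1, 1, 1, 1, 1], [1, 1, 1, 1, 1], [1, 1, 1, 1, 1]], 0, 0, 1)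

def Spec_has_liberty (board : List (List Int)) (i : Int) (j : Int) (color : Int) (out : Bool) : Prop := out = has_liberty_alt board i j color
instance (board : List (List Int)) (i : Int) (j : Int) (color : Int) (out : Bool) : Decidable (Spec_has_liberty board i j color out) := by unfold Spec_has_liberty; infer_instance

-- ===== CLAIM (what is proved, stated in full; the proofs are below) =====
def Claim_equal_has_liberty : Prop := ∀ (board : List (List Int)) (i : Int) (j : Int) (color : Int), Dom_has_liberty board i j color → Pre_has_liberty board i j color → Spec_has_liberty board i j color (has_liberty board i j color)

-- ===== LEMMAS AND PROOFS =====

theorem has_liberty_witness_ok :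
    Dom_has_liberty pvWitness_has_liberty.1 pvWitness_has_liberty.2.1 pvWitness_has_liberty.2.2.1 pvWitness_has_liberty.2.2.2 ∧
    Pre_has_liberty pvWitness_has_liberty.1 pvWitness_has_liberty.2.1 pvWitness_has_liberty.2.2.1 pvWitness_has_liberty.2.2.2 := by
  decide


-- ---------- proof-side definitions ----------

def nbrsL (c : Int × Int) : List (Int × Int) := [(c.1 + 1, c.2), (c.1, c.2 + 1), (c.1 - 1, c.2), (c.1, c.2 - 1)]

def inG (n : Int × Int) : Prop := pvInGrid n.1 n.2 = true

-- the group A and B both explore: the start plus color-connected in-grid cells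
inductive ReachA (board : List (List Int)) (color : Int) (s0 : Int × Int) : Int × Int → Prop
  | base : ReachA board color s0 s0
  | step {c n : Int × Int} : ReachA board color s0 c → n ∈ nbrsL c → inG n →
      pvCell board n.1 n.2 = color → pvCell board n.1 n.2 ≠ 0 → ReachA board color s0 n

-- "the group has a liberty": the common specification both searches decide
def LibP (board : List (List Int)) (color : Int) (s0 : Int × Int) : Prop :=
  ∃ c n, ReachA board color s0 c ∧ n ∈ nbrsL c ∧ inG n ∧ pvCell board n.1 n.2 = 0 ∧ n ≠ s0

def kN (c : Int × Int) (k : Nat) : Int × Int := (c.1 + pvDX.getD k 0, c.2 + pvDY.getD k 0)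

def gridL : List (Int × Int) := [(0, 0), (0, 1), (0, 2), (0, 3), (0, 4), (1, 0), (1, 1), (1, 2), (1, 3), (1, 4), (2, 0), (2, 1), (2, 2), (2, 3), (2, 4), (3, 0), (3, 1), (3, 2), (3, 3), (3, 4), (4, 0), (4, 1), (4, 2), (4, 3), (4, 4)]

def UF (s0 : Int × Int) : Finset (Int × Int) := (s0 :: gridL).toFinset

def measA (s0 : Int × Int) (v : List (Int × Int)) (s : List (Int × Int)) : Nat :=
  27 * ((UF s0) \ v.toFinset).card + s.length

lemma kN_mem {c : Int × Int} {k : Nat} (hk : k < 4) : kN c k ∈ nbrsL c := by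
  interval_cases k <;> simp [kN, nbrsL, pvDX, pvDY, sub_eq_add_neg]

lemma nbrsL_ex {c n : Int × Int} (h : n ∈ nbrsL c) : ∃ k ∈ List.range 4, n = kN c k := by
  simp only [nbrsL, List.mem_cons, List.not_mem_nil, or_false] at h
  rcases h with h | h | h | h
  · exact ⟨0, by simp, by simp [kN, pvDX, pvDY, h, sub_eq_add_neg]⟩
  · exact ⟨1, by simp, by simp [kN, pvDX, pvDY, h, sub_eq_add_neg]⟩
  · exact ⟨2, by simp, by simp [kN, pvDX, pvDY, h, sub_eq_add_neg]⟩
  · exact ⟨3, by simp, by simp [kN, pvDX, pvDY, h, sub_eq_add_neg]⟩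

lemma mem_nbrsL_off {c n : Int × Int} : n ∈ nbrsL c ↔ ∃ d ∈ pvOFFS, n = (c.1 + d.1, c.2 + d.2) := by
  constructor
  · intro h
    simp only [nbrsL, List.mem_cons, List.not_mem_nil, or_false] at h
    rcases h with h | h | h | h
    · exact ⟨(1, 0), by simp [pvOFFS], by simpa using h⟩
    · exact ⟨(0, 1), by simp [pvOFFS], by simpa using h⟩
    · exact ⟨(-1, 0), by simp [pvOFFS], by rw [h]; congr 1 <;> simp⟩
    · exact ⟨(0, -1), by simp [pvOFFS], by rw [h]; congr 1 <;> simp⟩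
  · rintro ⟨d, hd, rfl⟩
    fin_cases hd <;> simp [nbrsL, sub_eq_add_neg]

lemma offs_nbrs {c : Int × Int} {d : Int × Int} (hd : d ∈ pvOFFS) : (c.1 + d.1, c.2 + d.2) ∈ nbrsL c := by
  exact mem_nbrsL_off.2 ⟨d, hd, rfl⟩

lemma inG_iff {n : Int × Int} : inG n ↔ 0 ≤ n.1 ∧ n.1 < 5 ∧ 0 ≤ n.2 ∧ n.2 < 5 := by
  simp [inG, pvInGrid, pvSIZE]

lemma inG_mem_gridL {n : Int × Int} (h : inG n) : n ∈ gridL := by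
  rw [inG_iff] at h
  obtain ⟨x, y⟩ := n
  obtain ⟨h1, h2, h3, h4⟩ := h
  simp only at h1 h2 h3 h4
  interval_cases x <;> interval_cases y <;> simp [gridL]

lemma inG_mem_UF {s0 n : Int × Int} (h : inG n) : n ∈ UF s0 := by
  simp only [UF, List.mem_toFinset, List.mem_cons]
  exact Or.inr (inG_mem_gridL h)

lemma card_UF_le (s0 : Int × Int) : (UF s0).card ≤ 26 := by
  calc (UF s0).card ≤ (s0 :: gridL).length := List.toFinset_card_le _
    _ = 26 := by simp [gridL]

-- ---------- scanA characterization ----------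

lemma contains_true {v : PySem.Set (Int × Int)} {x : Int × Int} (h : x ∈ v) : PySem.Set.contains v x = true :=
  (PySem.Set.contains_iff _ _).mpr h
lemma contains_false {v : PySem.Set (Int × Int)} {x : Int × Int} (h : x ∉ v) : PySem.Set.contains v x = false := by
  rw [← Bool.not_eq_true]; exact fun hc => h ((PySem.Set.contains_iff _ _).mp hc)

lemma scanA_cons_out {board color v c k ks acc} (hg : ¬ inG (kN c k)) :
    scanA board color v c (k :: ks) acc = scanA board color v c ks acc := by
  simp only [inG, kN] at hg
  simp only [scanA, pvEMPTY]
  rw [if_neg hg]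

lemma scanA_cons_vis {board color v c k ks acc} (hg : inG (kN c k)) (hv : kN c k ∈ v) :
    scanA board color v c (k :: ks) acc = scanA board color v c ks acc := by
  simp only [inG, kN] at hg hv
  simp only [scanA, pvEMPTY]
  rw [if_pos hg, if_pos (contains_true hv)]

lemma scanA_cons_emp {board color v c k ks acc} (hg : inG (kN c k)) (hv : kN c k ∉ v)
    (he : pvCell board (kN c k).1 (kN c k).2 = 0) :
    scanA board color v c (k :: ks) acc = none := by
  simp only [inG, kN] at hg hv he
  simp only [scanA, pvEMPTY]
  rw [if_pos hg, if_neg (by rw [contains_false hv]; simp), if_pos (beq_iff_eq.mpr he)]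

lemma scanA_cons_col {board color v c k ks acc} (hg : inG (kN c k)) (hv : kN c k ∉ v)
    (he : pvCell board (kN c k).1 (kN c k).2 ≠ 0) (hc : pvCell board (kN c k).1 (kN c k).2 = color) :
    scanA board color v c (k :: ks) acc = scanA board color v c ks (kN c k :: acc) := by
  simp only [inG, kN] at hg hv he hc
  simp only [scanA, pvEMPTY]
  rw [if_pos hg, if_neg (by rw [contains_false hv]; simp),
    if_neg (fun hh => he (beq_iff_eq.mp hh)),
    if_pos (by rw [Bool.and_eq_true]; exact ⟨beq_iff_eq.mpr hc, by rw [contains_false hv]; rfl⟩)]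
  rfl

lemma scanA_cons_other {board color v c k ks acc} (hg : inG (kN c k)) (hv : kN c k ∉ v)
    (he : pvCell board (kN c k).1 (kN c k).2 ≠ 0) (hc : pvCell board (kN c k).1 (kN c k).2 ≠ color) :
    scanA board color v c (k :: ks) acc = scanA board color v c ks acc := by
  simp only [inG, kN] at hg hv he hc
  simp only [scanA, pvEMPTY]
  rw [if_pos hg, if_neg (by rw [contains_false hv]; simp),
    if_neg (fun hh => he (beq_iff_eq.mp hh)),
    if_neg (fun hh => hc (beq_iff_eq.mp ((Bool.and_eq_true _ _).mp hh).1))]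

lemma scanA_none {board : List (List Int)} {color : Int} {v : PySem.Set (Int × Int)} {c : Int × Int} :
    ∀ {ks : List Nat} {acc : List (Int × Int)},
    scanA board color v c ks acc = none →
    ∃ k ∈ ks, inG (kN c k) ∧ kN c k ∉ v ∧ pvCell board (kN c k).1 (kN c k).2 = 0 := by
  intro ks
  induction ks with
  | nil => intro acc h; simp [scanA] at h
  | cons k ks ih =>
    intro acc h
    by_cases hg : inG (kN c k)
    · by_cases hv : kN c k ∈ v
      · rw [scanA_cons_vis hg hv] at h
        obtain ⟨k', hk', hp⟩ := ih h
        exact ⟨k', List.mem_cons_of_mem _ hk', hp⟩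
      · by_cases he : pvCell board (kN c k).1 (kN c k).2 = 0
        · exact ⟨k, List.mem_cons_self, hg, hv, he⟩
        · by_cases hc : pvCell board (kN c k).1 (kN c k).2 = color
          · rw [scanA_cons_col hg hv he hc] at h
            obtain ⟨k', hk', hp⟩ := ih h
            exact ⟨k', List.mem_cons_of_mem _ hk', hp⟩
          · rw [scanA_cons_other hg hv he hc] at h
            obtain ⟨k', hk', hp⟩ := ih h
            exact ⟨k', List.mem_cons_of_mem _ hk', hp⟩
    · rw [scanA_cons_out hg] at h
      obtain ⟨k', hk', hp⟩ := ih h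
      exact ⟨k', List.mem_cons_of_mem _ hk', hp⟩

lemma scanA_some {board : List (List Int)} {color : Int} {v : PySem.Set (Int × Int)} {c : Int × Int} :
    ∀ {ks : List Nat} {acc out : List (Int × Int)},
    scanA board color v c ks acc = some out →
    (∀ x ∈ acc, x ∈ out) ∧
    (∀ x ∈ out, x ∈ acc ∨ ∃ k ∈ ks, x = kN c k ∧ inG x ∧ pvCell board x.1 x.2 = color ∧ pvCell board x.1 x.2 ≠ 0 ∧ x ∉ v) ∧
    (∀ k ∈ ks, inG (kN c k) → pvCell board (kN c k).1 (kN c k).2 = 0 → kN c k ∈ v) ∧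
    (∀ k ∈ ks, inG (kN c k) → pvCell board (kN c k).1 (kN c k).2 = color → pvCell board (kN c k).1 (kN c k).2 ≠ 0 → kN c k ∉ v → kN c k ∈ out) ∧
    out.length ≤ ks.length + acc.length := by
  intro ks
  induction ks with
  | nil =>
    intro acc out h
    simp only [scanA, Option.some.injEq] at h
    subst h
    exact ⟨fun x hx => hx, fun x hx => Or.inl hx, by simp, by simp, by simp⟩
  | cons k ks ih =>
    intro acc out h
    by_cases hg : inG (kN c k)
    · by_cases hv : kN c k ∈ v
      · rw [scanA_cons_vis hg hv] at h
        obtain ⟨c1, c2, c3, c4, c5⟩ := ih h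
        refine ⟨c1, ?_, ?_, ?_, by simp only [List.length_cons]; omega⟩
        · intro x hx
          rcases c2 x hx with h1 | ⟨k', hk', hp⟩
          · exact Or.inl h1
          · exact Or.inr ⟨k', List.mem_cons_of_mem _ hk', hp⟩
        · intro k' hk'
          rcases List.mem_cons.1 hk' with rfl | hk'
          · intro _ _; exact hv
          · exact c3 k' hk'
        · intro k' hk'
          rcases List.mem_cons.1 hk' with rfl | hk'
          · intro _ _ _ hnv; exact absurd hv hnv
          · exact c4 k' hk'
      · by_cases he : pvCell board (kN c k).1 (kN c k).2 = 0
        · rw [scanA_cons_emp hg hv he] at h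
          exact absurd h (by simp)
        · by_cases hc : pvCell board (kN c k).1 (kN c k).2 = color
          · rw [scanA_cons_col hg hv he hc] at h
            obtain ⟨c1, c2, c3, c4, c5⟩ := ih h
            refine ⟨fun x hx => c1 x (List.mem_cons_of_mem _ hx), ?_, ?_, ?_, ?_⟩
            · intro x hx
              rcases c2 x hx with h1 | ⟨k', hk', hp⟩
              · rcases List.mem_cons.1 h1 with rfl | h1
                · exact Or.inr ⟨k, List.mem_cons_self, rfl, hg, hc, he, hv⟩
                · exact Or.inl h1
              · exact Or.inr ⟨k', List.mem_cons_of_mem _ hk', hp⟩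
            · intro k' hk'
              rcases List.mem_cons.1 hk' with rfl | hk'
              · intro _ h0; exact absurd h0 he
              · exact c3 k' hk'
            · intro k' hk'
              rcases List.mem_cons.1 hk' with rfl | hk'
              · intro _ _ _ _; exact c1 _ List.mem_cons_self
              · exact c4 k' hk'
            · simp only [List.length_cons] at c5 ⊢
              omega
          · rw [scanA_cons_other hg hv he hc] at h
            obtain ⟨c1, c2, c3, c4, c5⟩ := ih h
            refine ⟨c1, ?_, ?_, ?_, by simp only [List.length_cons]; omega⟩
            · intro x hx
              rcases c2 x hx with h1 | ⟨k', hk', hp⟩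
              · exact Or.inl h1
              · exact Or.inr ⟨k', List.mem_cons_of_mem _ hk', hp⟩
            · intro k' hk'
              rcases List.mem_cons.1 hk' with rfl | hk'
              · intro _ h0; exact absurd h0 he
              · exact c3 k' hk'
            · intro k' hk'
              rcases List.mem_cons.1 hk' with rfl | hk'
              · intro _ hcol _ _; exact absurd hcol hc
              · exact c4 k' hk'
    · rw [scanA_cons_out hg] at h
      obtain ⟨c1, c2, c3, c4, c5⟩ := ih h
      refine ⟨c1, ?_, ?_, ?_, by simp only [List.length_cons]; omega⟩
      · intro x hx
        rcases c2 x hx with h1 | ⟨k', hk', hp⟩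
        · exact Or.inl h1
        · exact Or.inr ⟨k', List.mem_cons_of_mem _ hk', hp⟩
      · intro k' hk'
        rcases List.mem_cons.1 hk' with rfl | hk'
        · intro hg' _; exact absurd hg' hg
        · exact c3 k' hk'
      · intro k' hk'
        rcases List.mem_cons.1 hk' with rfl | hk'
        · intro hg' _ _ _; exact absurd hg' hg
        · exact c4 k' hk'

-- ---------- the LIFO invariant of A's stack ----------

def PInvX (board : List (List Int)) (color : Int) (v : List (Int × Int)) :
    List (Int × Int) → List (Int × Int) → Prop
  | _, [] => True
  | above, c :: rest =>
      (c ∈ v → ∀ n ∈ nbrsL c, inG n → pvCell board n.1 n.2 = color → pvCell board n.1 n.2 ≠ 0 → n ∈ v ∨ n ∈ above)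
      ∧ PInvX board color v (c :: above) rest

def PInvA (board : List (List Int)) (color : Int) (v : List (Int × Int)) (s : List (Int × Int)) : Prop :=
  PInvX board color v [] s

lemma pinvx_mono {board : List (List Int)} {color : Int} {v v' : List (Int × Int)} {c : Int × Int} :
    ∀ {s above above' : List (Int × Int)},
    PInvX board color v above s →
    (∀ d ∈ s, d ∈ v' → d ∈ v ∨ d = c) →
    (∀ x ∈ v, x ∈ v') →
    (∀ n ∈ above, n ∈ above' ∨ n ∈ v') →
    (∀ n ∈ nbrsL c, inG n → pvCell board n.1 n.2 = color → pvCell board n.1 n.2 ≠ 0 → n ∈ v' ∨ n ∈ above') →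
    PInvX board color v' above' s := by
  intro s
  induction s with
  | nil => intro above above' _ _ _ _ _; trivial
  | cons d rest ih =>
    intro above above' h hset hsub hab hc
    refine ⟨?_, ?_⟩
    · intro hdv' n hn hg hcol hnz
      rcases hset d (List.mem_cons_self) hdv' with hdv | rfl
      · rcases h.1 hdv n hn hg hcol hnz with h1 | h1
        · exact Or.inl (hsub _ h1)
        · rcases hab n h1 with h2 | h2
          · exact Or.inr h2
          · exact Or.inl h2
      · exact hc n hn hg hcol hnz
    · refine ih h.2 (fun x hx => hset x (List.mem_cons_of_mem _ hx)) hsub ?_ ?_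
      · intro n hn
        rcases List.mem_cons.1 hn with rfl | hn
        · exact Or.inl List.mem_cons_self
        · rcases hab n hn with h2 | h2
          · exact Or.inl (List.mem_cons_of_mem _ h2)
          · exact Or.inr h2
      · intro n hn hg hcol hnz
        rcases hc n hn hg hcol hnz with h2 | h2
        · exact Or.inl h2
        · exact Or.inr (List.mem_cons_of_mem _ h2)

lemma pinvx_above {board : List (List Int)} {color : Int} {v : List (Int × Int)} :
    ∀ {s above above' : List (Int × Int)},
    PInvX board color v above s →
    (∀ n ∈ above, n ∈ above' ∨ n ∈ v) →
    PInvX board color v above' s := by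
  intro s
  induction s with
  | nil => intro above above' _ _; trivial
  | cons d rest ih =>
    intro above above' h hab
    refine ⟨?_, ?_⟩
    · intro hdv n hn hg hcol hnz
      rcases h.1 hdv n hn hg hcol hnz with h1 | h1
      · exact Or.inl h1
      · rcases hab n h1 with h2 | h2
        · exact Or.inr h2
        · exact Or.inl h2
    · refine ih h.2 ?_
      intro n hn
      rcases List.mem_cons.1 hn with rfl | hn
      · exact Or.inl List.mem_cons_self
      · rcases hab n hn with h2 | h2
        · exact Or.inl (List.mem_cons_of_mem _ h2)
        · exact Or.inr h2

lemma pinvx_prefix {board : List (List Int)} {color : Int} {v' : List (Int × Int)} :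
    ∀ (P : List (Int × Int)) {above s : List (Int × Int)},
    (∀ x ∈ P, x ∉ v') →
    PInvX board color v' (P ++ above) s →
    PInvX board color v' above (P ++ s) := by
  intro P
  induction P with
  | nil => intro above s _ h; exact h
  | cons p P ih =>
    intro above s hP h
    refine ⟨fun hp => absurd hp (hP p List.mem_cons_self), ?_⟩
    refine ih (fun x hx => hP x (List.mem_cons_of_mem _ hx)) ?_
    refine pinvx_above h ?_
    intro n hn
    simp only [List.cons_append, List.mem_cons, List.mem_append] at hn ⊢
    tauto

-- ---------- main lemma for A's loop ----------

lemma loopA_nil {board : List (List Int)} {color : Int} {f : Nat} {v : PySem.Set (Int × Int)} :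
    loopA board color (f + 1) [] v = some false := by
  simp [loopA]

lemma loopA_cons_none {board : List (List Int)} {color : Int} {f : Nat} {v : PySem.Set (Int × Int)}
    {c : Int × Int} {rest : List (Int × Int)}
    (hscan : scanA board color (PySem.Set.add v c) c (List.range 4) [] = none) :
    loopA board color (f + 1) (c :: rest) v = some true := by
  simp [loopA, hscan]

lemma loopA_cons_some {board : List (List Int)} {color : Int} {f : Nat} {v : PySem.Set (Int × Int)}
    {c : Int × Int} {rest pushes : List (Int × Int)}
    (hscan : scanA board color (PySem.Set.add v c) c (List.range 4) [] = some pushes) :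
    loopA board color (f + 1) (c :: rest) v = loopA board color f (pushes ++ rest) (PySem.Set.add v c) := by
  simp [loopA, hscan]

lemma loopA_main (board : List (List Int)) (color : Int) (s0 : Int × Int) :
    ∀ (f : Nat) (s : List (Int × Int)) (v : PySem.Set (Int × Int)),
    (∀ x ∈ s, x ∈ UF s0) →
    (∀ x ∈ s, ReachA board color s0 x) →
    (s0 ∈ v ∨ (s = [s0] ∧ v = ([] : List (Int × Int)))) →
    (∀ x ∈ v, x = s0 ∨ pvCell board x.1 x.2 ≠ 0) →
    (∀ x ∈ s, x = s0 ∨ pvCell board x.1 x.2 ≠ 0) →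
    (∀ d ∈ v, ∀ n ∈ nbrsL d, inG n → pvCell board n.1 n.2 = color → pvCell board n.1 n.2 ≠ 0 → n ∈ v ∨ n ∈ s) →
    (∀ d ∈ v, ∀ n ∈ nbrsL d, inG n → pvCell board n.1 n.2 = 0 → n = s0) →
    PInvA board color v s →
    measA s0 v s < f →
    ∃ b, loopA board color f s v = some b ∧ (b = true → LibP board color s0) ∧ (b = false → ¬ LibP board color s0) := by
  intro f
  induction f with
  | zero => intro s v _ _ _ _ _ _ _ _ hm; exact absurd hm (by omega)
  | succ f ih =>
    intro s v hSU hSR hStart hVI hSI hCI hNI hPI hm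
    cases s with
    | nil =>
      refine ⟨false, loopA_nil, by simp, ?_⟩
      intro _ hlib
      obtain ⟨cc, nn, hr, hn, hg, he, hns⟩ := hlib
      have hs0 : s0 ∈ v := by
        rcases hStart with h | ⟨h, _⟩
        · exact h
        · exact absurd h (by simp)
      have hreach : ∀ x, ReachA board color s0 x → x ∈ v := by
        intro x hx
        induction hx with
        | base => exact hs0
        | step hr' hn' hg' hcol' hnz' ih' =>
          rcases hCI _ ih' _ hn' hg' hcol' hnz' with h | h
          · exact h
          · exact absurd h (by simp)
      exact hns (hNI _ (hreach _ hr) _ hn hg he)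
    | cons c rest =>
      have hs0v' : s0 ∈ PySem.Set.add v c := by
        rcases hStart with h | ⟨hh, _⟩
        · exact (PySem.Set.mem_add v c s0).mpr (Or.inl h)
        · obtain ⟨rfl, -⟩ := List.cons_eq_cons.mp hh
          exact (PySem.Set.mem_add v c c).mpr (Or.inr rfl)
      cases hscan : scanA board color (PySem.Set.add v c) c (List.range 4) [] with
      | none =>
        refine ⟨true, loopA_cons_none hscan, fun _ => ?_, by simp⟩
        obtain ⟨k, hk, hg, hnv, he⟩ := scanA_none hscan
        have hkn : kN c k ∈ nbrsL c := kN_mem (List.mem_range.1 hk)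
        refine ⟨c, kN c k, hSR c List.mem_cons_self, hkn, hg, he, ?_⟩
        intro heq
        rw [heq] at hnv
        exact hnv hs0v'
      | some pushes =>
        obtain ⟨c1, c2, c3, c4, c5⟩ := scanA_some hscan
        have hpush : ∀ x ∈ pushes, ∃ k ∈ List.range 4, x = kN c k ∧ inG x ∧
            pvCell board x.1 x.2 = color ∧ pvCell board x.1 x.2 ≠ 0 ∧ x ∉ PySem.Set.add v c :=
          fun x hx => (c2 x hx).resolve_left (by simp)
        have hlen : pushes.length ≤ 4 := by simpa using c5
        -- invariants for the new state
        have hSU' : ∀ x ∈ pushes ++ rest, x ∈ UF s0 := by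
          intro x hx
          rcases List.mem_append.1 hx with hx | hx
          · obtain ⟨k, _, _, hg, _⟩ := hpush x hx
            exact inG_mem_UF hg
          · exact hSU x (List.mem_cons_of_mem _ hx)
        have hSR' : ∀ x ∈ pushes ++ rest, ReachA board color s0 x := by
          intro x hx
          rcases List.mem_append.1 hx with hx | hx
          · obtain ⟨k, hk, rfl, hg, hcol, hnz, _⟩ := hpush x hx
            exact ReachA.step (hSR c List.mem_cons_self) (kN_mem (List.mem_range.1 hk)) hg hcol hnz
          · exact hSR x (List.mem_cons_of_mem _ hx)
        have hVI' : ∀ x ∈ PySem.Set.add v c, x = s0 ∨ pvCell board x.1 x.2 ≠ 0 := by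
          intro x hx
          rcases (PySem.Set.mem_add v c x).mp hx with hx | rfl
          · exact hVI x hx
          · exact hSI x List.mem_cons_self
        have hSI' : ∀ x ∈ pushes ++ rest, x = s0 ∨ pvCell board x.1 x.2 ≠ 0 := by
          intro x hx
          rcases List.mem_append.1 hx with hx | hx
          · obtain ⟨k, _, _, _, _, hnz, _⟩ := hpush x hx
            exact Or.inr hnz
          · exact hSI x (List.mem_cons_of_mem _ hx)
        have hCI' : ∀ d ∈ PySem.Set.add v c, ∀ n ∈ nbrsL d, inG n → pvCell board n.1 n.2 = color →
            pvCell board n.1 n.2 ≠ 0 → n ∈ PySem.Set.add v c ∨ n ∈ pushes ++ rest := by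
          intro d hd n hn hg hcol hnz
          rcases (PySem.Set.mem_add v c d).mp hd with hd | rfl
          · rcases hCI d hd n hn hg hcol hnz with h | h
            · exact Or.inl ((PySem.Set.mem_add v c n).mpr (Or.inl h))
            · rcases List.mem_cons.1 h with rfl | h
              · exact Or.inl ((PySem.Set.mem_add v _ _).mpr (Or.inr rfl))
              · exact Or.inr (List.mem_append.2 (Or.inr h))
          · by_cases hnv : n ∈ PySem.Set.add v d
            · exact Or.inl hnv
            · obtain ⟨k, hk, rfl⟩ := nbrsL_ex hn
              exact Or.inr (List.mem_append.2 (Or.inl (c4 k hk hg hcol hnz hnv)))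
        have hNI' : ∀ d ∈ PySem.Set.add v c, ∀ n ∈ nbrsL d, inG n → pvCell board n.1 n.2 = 0 → n = s0 := by
          intro d hd n hn hg he
          rcases (PySem.Set.mem_add v c d).mp hd with hd | rfl
          · exact hNI d hd n hn hg he
          · obtain ⟨k, hk, rfl⟩ := nbrsL_ex hn
            have hin : kN d k ∈ PySem.Set.add v d := c3 k hk hg he
            rcases hVI' _ hin with h | h
            · exact h
            · exact absurd he h
        by_cases hcv : c ∈ v
        · -- the popped cell was already visited: the LIFO invariant forces an empty scan
          have hveq : PySem.Set.add v c = v := PySem.Set.add_of_mem hcv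
          have hpe : pushes = [] := by
            rcases hpe : pushes with - | ⟨p, ps⟩
            · rfl
            · exfalso
              have hp : p ∈ pushes := by rw [hpe]; exact List.mem_cons_self
              obtain ⟨k, hk, rfl, hg, hcol, hnz, hnv⟩ := hpush p hp
              rw [hveq] at hnv
              rcases hPI.1 hcv _ (kN_mem (List.mem_range.1 hk)) hg hcol hnz with h | h
              · exact hnv h
              · exact absurd h (by simp)
          have hStart' : s0 ∈ v ∨ (rest = [s0] ∧ v = ([] : List (Int × Int))) := by
            rcases hStart with h | ⟨-, hve⟩
            · exact Or.inl h
            · rw [hve] at hcv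
              exact absurd hcv (by simp)
          have hCI'' : ∀ d ∈ v, ∀ n ∈ nbrsL d, inG n → pvCell board n.1 n.2 = color →
              pvCell board n.1 n.2 ≠ 0 → n ∈ v ∨ n ∈ rest := by
            intro d hd n hn hg hcol hnz
            rcases hCI d hd n hn hg hcol hnz with h | h
            · exact Or.inl h
            · rcases List.mem_cons.1 h with rfl | h
              · exact Or.inl hcv
              · exact Or.inr h
          have hPI' : PInvA board color v rest := by
            refine pinvx_above hPI.2 ?_
            intro n hn
            rcases List.mem_cons.1 hn with rfl | hn
            · exact Or.inr hcv
            · exact absurd hn (by simp)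
          have hm' : measA s0 v rest < f := by
            simp only [measA, List.length_cons] at hm ⊢
            omega
          obtain ⟨b, heq, h1, h2⟩ := ih rest v (fun x hx => hSU x (List.mem_cons_of_mem _ hx))
            (fun x hx => hSR x (List.mem_cons_of_mem _ hx)) hStart' hVI
            (fun x hx => hSI x (List.mem_cons_of_mem _ hx)) hCI'' hNI hPI' hm'
          refine ⟨b, ?_, h1, h2⟩
          rw [loopA_cons_some hscan, hveq, hpe, List.nil_append]
          exact heq
        · -- a fresh cell is visited: the measure drops by at least 23
          have hvadd : PySem.Set.add v c = v ++ [c] := PySem.Set.add_of_not_mem hcv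
          have hfin : (PySem.Set.add v c).toFinset = insert c v.toFinset := by
            rw [hvadd]
            ext x
            simp
          have hcuf : c ∈ UF s0 := hSU c List.mem_cons_self
          have hcsd : c ∈ UF s0 \ v.toFinset := Finset.mem_sdiff.mpr ⟨hcuf, by simpa using hcv⟩
          have hsd : UF s0 \ (PySem.Set.add v c).toFinset = (UF s0 \ v.toFinset).erase c := by
            rw [hfin]
            ext x
            simp only [Finset.mem_sdiff, Finset.mem_erase, Finset.mem_insert]
            tauto
          have hcard : ((UF s0) \ (PySem.Set.add v c).toFinset).card = ((UF s0) \ v.toFinset).card - 1 := by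
            rw [hsd, Finset.card_erase_of_mem hcsd]
          have hpos : 0 < ((UF s0) \ v.toFinset).card := Finset.card_pos.mpr ⟨c, hcsd⟩
          have hm' : measA s0 (PySem.Set.add v c) (pushes ++ rest) < f := by
            simp only [measA, List.length_append, List.length_cons] at hm ⊢
            omega
          have hStart' : s0 ∈ PySem.Set.add v c ∨
              (pushes ++ rest = [s0] ∧ PySem.Set.add v c = ([] : List (Int × Int))) := Or.inl hs0v'
          have hPI' : PInvA board color (PySem.Set.add v c) (pushes ++ rest) := by
            have hstep : PInvX board color (PySem.Set.add v c) (pushes ++ []) rest := by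
              refine pinvx_mono (c := c) hPI.2 ?_ ?_ ?_ ?_
              · intro d _ hd
                exact (PySem.Set.mem_add v c d).mp hd
              · intro x hx
                exact (PySem.Set.mem_add v c x).mpr (Or.inl hx)
              · intro n hn
                rcases List.mem_cons.1 hn with rfl | hn
                · exact Or.inr ((PySem.Set.mem_add v _ _).mpr (Or.inr rfl))
                · exact absurd hn (by simp)
              · intro n hn hg hcol hnz
                by_cases hnv : n ∈ PySem.Set.add v c
                · exact Or.inl hnv
                · obtain ⟨k, hk, rfl⟩ := nbrsL_ex hn
                  exact Or.inr (List.mem_append.2 (Or.inl (c4 k hk hg hcol hnz hnv)))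
            refine pinvx_prefix pushes ?_ hstep
            intro x hx
            obtain ⟨k, _, _, _, _, _, hnv⟩ := hpush x hx
            exact hnv
          obtain ⟨b, heq, h1, h2⟩ := ih (pushes ++ rest) (PySem.Set.add v c) hSU' hSR' hStart' hVI' hSI' hCI' hNI' hPI' hm'
          refine ⟨b, ?_, h1, h2⟩
          rw [loopA_cons_some hscan]
          exact heq

-- ---------- main lemma for B's recursion ----------

def VInvB (board : List (List Int)) (s0 : Int × Int) (v : List (Int × Int)) : Prop :=
  ∀ x ∈ v, x = s0 ∨ pvCell board x.1 x.2 ≠ 0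

def NoLibC (board : List (List Int)) (s0 : Int × Int) (x : Int × Int) : Prop :=
  ∀ n ∈ nbrsL x, inG n → pvCell board n.1 n.2 = 0 → n = s0

def ClosedInto (board : List (List Int)) (color : Int) (v2 : List (Int × Int)) (x : Int × Int) : Prop :=
  ∀ n ∈ nbrsL x, inG n → pvCell board n.1 n.2 = color → pvCell board n.1 n.2 ≠ 0 → n ∈ v2

def PdfsStmt (board : List (List Int)) (color : Int) (s0 : Int × Int) (f : Nat) : Prop :=
  ∀ (v : PySem.Set (Int × Int)) (c : Int × Int),
    VInvB board s0 v → (∀ x ∈ v, ReachA board color s0 x) → (c = s0 ∨ s0 ∈ v) →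
    (c = s0 ∨ pvCell board c.1 c.2 ≠ 0) → ReachA board color s0 c →
    c ∉ v → c ∈ UF s0 →
    ((UF s0) \ v.toFinset).card < f →
    ∃ b v2, dfsB board color f v c = some (b, v2) ∧ (∀ x ∈ v, x ∈ v2) ∧ c ∈ v2 ∧
      VInvB board s0 v2 ∧ (∀ x ∈ v2, ReachA board color s0 x) ∧
      (b = true → LibP board color s0) ∧
      (b = false → ∀ x ∈ v2, x ∈ v ∨ (NoLibC board s0 x ∧ ClosedInto board color v2 x))

def PscanStmt (board : List (List Int)) (color : Int) (s0 : Int × Int) (f : Nat) : Prop :=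
  ∀ (v : PySem.Set (Int × Int)) (c : Int × Int) (ds : List (Int × Int)),
    VInvB board s0 v → (∀ x ∈ v, ReachA board color s0 x) → s0 ∈ v →
    ReachA board color s0 c →
    (∀ d ∈ ds, (c.1 + d.1, c.2 + d.2) ∈ nbrsL c) →
    ((UF s0) \ v.toFinset).card < f →
    ∃ b v2, scanB board color f v c ds = some (b, v2) ∧ (∀ x ∈ v, x ∈ v2) ∧
      VInvB board s0 v2 ∧ (∀ x ∈ v2, ReachA board color s0 x) ∧
      (b = true → LibP board color s0) ∧
      (b = false →
        (∀ x ∈ v2, x ∈ v ∨ (NoLibC board s0 x ∧ ClosedInto board color v2 x)) ∧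
        (∀ d ∈ ds, inG (c.1 + d.1, c.2 + d.2) →
          (pvCell board (c.1 + d.1) (c.2 + d.2) = 0 ∨ (pvCell board (c.1 + d.1) (c.2 + d.2) = color ∧ pvCell board (c.1 + d.1) (c.2 + d.2) ≠ 0)) →
          (c.1 + d.1, c.2 + d.2) ∈ v2))

lemma card_sub {s0 : Int × Int} {v v2 : List (Int × Int)} (h : ∀ x ∈ v, x ∈ v2) :
    ((UF s0) \ v2.toFinset).card ≤ ((UF s0) \ v.toFinset).card := by
  apply Finset.card_le_card
  intro x hx
  rw [Finset.mem_sdiff] at hx ⊢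
  refine ⟨hx.1, fun hh => hx.2 ?_⟩
  rw [List.mem_toFinset] at hh ⊢
  exact h x hh

lemma sdiff_add_card {s0 : Int × Int} {v : PySem.Set (Int × Int)} {c : Int × Int}
    (hcu : c ∈ UF s0) (hcv : c ∉ v) :
    ((UF s0) \ (PySem.Set.add v c).toFinset).card + 1 = ((UF s0) \ v.toFinset).card := by
  have hvadd : PySem.Set.add v c = v ++ [c] := PySem.Set.add_of_not_mem hcv
  have hcsd : c ∈ UF s0 \ v.toFinset := Finset.mem_sdiff.mpr ⟨hcu, by simpa using hcv⟩
  have hsd : UF s0 \ (PySem.Set.add v c).toFinset = (UF s0 \ v.toFinset).erase c := by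
    rw [hvadd]
    ext x
    simp only [Finset.mem_sdiff, Finset.mem_erase, List.mem_toFinset, List.mem_append,
      List.mem_singleton]
    tauto
  rw [hsd, Finset.card_erase_of_mem hcsd]
  have hpos : 0 < ((UF s0) \ v.toFinset).card := Finset.card_pos.mpr ⟨c, hcsd⟩
  omega

lemma dfsB_succ {board : List (List Int)} {color : Int} {f : Nat} {v : PySem.Set (Int × Int)} {c : Int × Int} :
    dfsB board color (f + 1) v c = scanB board color f (PySem.Set.add v c) c pvOFFS := by
  simp [dfsB]

lemma scanB_nil {board : List (List Int)} {color : Int} {f : Nat} {v : PySem.Set (Int × Int)} {c : Int × Int} :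
    scanB board color f v c [] = some (false, v) := by
  cases f <;> simp [scanB]

lemma scanB_cons_skip {board : List (List Int)} {color : Int} {f : Nat} {v : PySem.Set (Int × Int)}
    {c d : Int × Int} {ds : List (Int × Int)}
    (h : ¬ (inG (c.1 + d.1, c.2 + d.2) ∧ (c.1 + d.1, c.2 + d.2) ∉ v)) :
    scanB board color f v c (d :: ds) = scanB board color f v c ds := by
  simp only [scanB]
  rw [if_neg]
  intro hh
  rw [Bool.and_eq_true] at hh
  refine h ⟨hh.1, ?_⟩
  intro hmem
  rw [Bool.not_eq_true'] at hh
  exact absurd (contains_true hmem) (by rw [hh.2]; simp)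

lemma scanB_guard {v : PySem.Set (Int × Int)}
    {c d : Int × Int} (hg : inG (c.1 + d.1, c.2 + d.2)) (hv : (c.1 + d.1, c.2 + d.2) ∉ v) :
    (pvInGrid (c.1 + d.1) (c.2 + d.2) && !(PySem.Set.contains v (c.1 + d.1, c.2 + d.2))) = true := by
  rw [Bool.and_eq_true]
  exact ⟨hg, by rw [contains_false hv]; rfl⟩

lemma scanB_cons_emp {board : List (List Int)} {color : Int} {f : Nat} {v : PySem.Set (Int × Int)}
    {c d : Int × Int} {ds : List (Int × Int)}
    (hg : inG (c.1 + d.1, c.2 + d.2)) (hv : (c.1 + d.1, c.2 + d.2) ∉ v)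
    (he : pvCell board (c.1 + d.1) (c.2 + d.2) = 0) :
    scanB board color f v c (d :: ds) = some (true, v) := by
  simp only [scanB, pvEMPTY]
  rw [if_pos (scanB_guard hg hv), if_pos (beq_iff_eq.mpr he)]

lemma scanB_cons_col_true {board : List (List Int)} {color : Int} {f : Nat} {v v2 : PySem.Set (Int × Int)}
    {c d : Int × Int} {ds : List (Int × Int)}
    (hg : inG (c.1 + d.1, c.2 + d.2)) (hv : (c.1 + d.1, c.2 + d.2) ∉ v)
    (he : pvCell board (c.1 + d.1) (c.2 + d.2) ≠ 0)
    (hc : pvCell board (c.1 + d.1) (c.2 + d.2) = color)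
    (hd : dfsB board color f v (c.1 + d.1, c.2 + d.2) = some (true, v2)) :
    scanB board color f v c (d :: ds) = some (true, v2) := by
  simp only [scanB, pvEMPTY]
  rw [if_pos (scanB_guard hg hv), if_neg (fun hh => he (beq_iff_eq.mp hh)),
    if_pos (beq_iff_eq.mpr hc), hd]

lemma scanB_cons_col_false {board : List (List Int)} {color : Int} {f : Nat} {v v2 : PySem.Set (Int × Int)}
    {c d : Int × Int} {ds : List (Int × Int)}
    (hg : inG (c.1 + d.1, c.2 + d.2)) (hv : (c.1 + d.1, c.2 + d.2) ∉ v)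
    (he : pvCell board (c.1 + d.1) (c.2 + d.2) ≠ 0)
    (hc : pvCell board (c.1 + d.1) (c.2 + d.2) = color)
    (hd : dfsB board color f v (c.1 + d.1, c.2 + d.2) = some (false, v2)) :
    scanB board color f v c (d :: ds) = scanB board color f v2 c ds := by
  simp only [scanB, pvEMPTY]
  rw [if_pos (scanB_guard hg hv), if_neg (fun hh => he (beq_iff_eq.mp hh)),
    if_pos (beq_iff_eq.mpr hc), hd]

lemma scanB_cons_other {board : List (List Int)} {color : Int} {f : Nat} {v : PySem.Set (Int × Int)}
    {c d : Int × Int} {ds : List (Int × Int)}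
    (hg : inG (c.1 + d.1, c.2 + d.2)) (hv : (c.1 + d.1, c.2 + d.2) ∉ v)
    (he : pvCell board (c.1 + d.1) (c.2 + d.2) ≠ 0)
    (hc : pvCell board (c.1 + d.1) (c.2 + d.2) ≠ color) :
    scanB board color f v c (d :: ds) = scanB board color f v c ds := by
  simp only [scanB, pvEMPTY]
  rw [if_pos (scanB_guard hg hv),
    if_neg (fun hh => he (beq_iff_eq.mp hh)),
    if_neg (fun hh => hc (beq_iff_eq.mp hh))]

lemma dfsB_scanB_main (board : List (List Int)) (color : Int) (s0 : Int × Int) :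
    ∀ f : Nat, PdfsStmt board color s0 f ∧ PscanStmt board color s0 f := by
  intro f
  induction f with
  | zero =>
    constructor
    · intro v c _ _ _ _ _ _ _ hf
      exact absurd hf (by omega)
    · intro v c ds _ _ _ _ _ hf
      exact absurd hf (by omega)
  | succ f ih =>
    have hdfs : PdfsStmt board color s0 (f + 1) := by
      intro v c hVI hRV hs0 hcell hreach hcv hcu hf
      have hs0' : s0 ∈ PySem.Set.add v c := by
        rcases hs0 with rfl | h
        · exact (PySem.Set.mem_add v _ _).mpr (Or.inr rfl)
        · exact (PySem.Set.mem_add v c s0).mpr (Or.inl h)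
      have hVI' : VInvB board s0 (PySem.Set.add v c) := by
        intro x hx
        rcases (PySem.Set.mem_add v c x).mp hx with hx | rfl
        · exact hVI x hx
        · exact hcell
      have hRV' : ∀ x ∈ PySem.Set.add v c, ReachA board color s0 x := by
        intro x hx
        rcases (PySem.Set.mem_add v c x).mp hx with hx | rfl
        · exact hRV x hx
        · exact hreach
      have hf' : ((UF s0) \ (PySem.Set.add v c).toFinset).card < f := by
        have := sdiff_add_card hcu hcv
        omega
      obtain ⟨b, v2, heq, hsub, hVI2, hRV2, htrue, hfalse⟩ :=
        ih.2 (PySem.Set.add v c) c pvOFFS hVI' hRV' hs0' hreach (fun d hd => offs_nbrs hd) hf'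
      refine ⟨b, v2, by rw [dfsB_succ]; exact heq,
        fun x hx => hsub x ((PySem.Set.mem_add v c x).mpr (Or.inl hx)),
        hsub c ((PySem.Set.mem_add v c c).mpr (Or.inr rfl)), hVI2, hRV2, htrue, ?_⟩
      intro hb x hx
      rcases (hfalse hb).1 x hx with hx' | hx'
      · rcases (PySem.Set.mem_add v c x).mp hx' with hx'' | rfl
        · exact Or.inl hx''
        · refine Or.inr ⟨?_, ?_⟩
          · intro n hn hg he
            obtain ⟨d, hd, rfl⟩ := mem_nbrsL_off.mp hn
            have hnv2 := (hfalse hb).2 d hd hg (Or.inl he)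
            rcases hVI2 _ hnv2 with h | h
            · exact h
            · exact absurd he h
          · intro n hn hg hcol hnz
            obtain ⟨d, hd, rfl⟩ := mem_nbrsL_off.mp hn
            exact (hfalse hb).2 d hd hg (Or.inr ⟨hcol, hnz⟩)
      · exact Or.inr hx'
    refine ⟨hdfs, ?_⟩
    intro v c ds
    induction ds generalizing v with
    | nil =>
      intro hVI hRV hs0 hreach _ _
      exact ⟨false, v, scanB_nil, fun x hx => hx, hVI, hRV, by simp,
        fun _ => ⟨fun x hx => Or.inl hx, by simp⟩⟩
    | cons d ds ihds =>
      intro hVI hRV hs0 hreach hds hf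
      by_cases hg : inG (c.1 + d.1, c.2 + d.2)
      · by_cases hv : (c.1 + d.1, c.2 + d.2) ∈ v
        · obtain ⟨b, v2, heq, hsub, hVI2, hRV2, htrue, hfalse⟩ :=
            ihds v hVI hRV hs0 hreach (fun d' hd' => hds d' (List.mem_cons_of_mem _ hd')) hf
          refine ⟨b, v2, by rw [scanB_cons_skip (fun hh => hh.2 hv)]; exact heq,
            hsub, hVI2, hRV2, htrue, ?_⟩
          intro hb
          refine ⟨(hfalse hb).1, ?_⟩
          intro d' hd' hg' hcell'
          rcases List.mem_cons.1 hd' with rfl | hd'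
          · exact hsub _ hv
          · exact (hfalse hb).2 d' hd' hg' hcell'
        · by_cases he : pvCell board (c.1 + d.1) (c.2 + d.2) = 0
          · refine ⟨true, v, scanB_cons_emp hg hv he, fun x hx => hx, hVI, hRV, fun _ => ?_, by simp⟩
            refine ⟨c, (c.1 + d.1, c.2 + d.2), hreach, hds d List.mem_cons_self, hg, he, ?_⟩
            intro hh
            rw [hh] at hv
            exact hv hs0
          · by_cases hcol : pvCell board (c.1 + d.1) (c.2 + d.2) = color
            · obtain ⟨b', v2, heqd, hsub2, hmem2, hVI2, hRV2, htrue2, hfalse2⟩ :=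
                hdfs v (c.1 + d.1, c.2 + d.2) hVI hRV (Or.inr hs0) (Or.inr he)
                  (ReachA.step hreach (hds d List.mem_cons_self) hg hcol he)
                  hv (inG_mem_UF hg) hf
              cases b' with
              | true =>
                exact ⟨true, v2, scanB_cons_col_true hg hv he hcol heqd, hsub2, hVI2, hRV2,
                  fun _ => htrue2 rfl, by simp⟩
              | false =>
                have hf2 : ((UF s0) \ v2.toFinset).card < f + 1 :=
                  lt_of_le_of_lt (card_sub hsub2) hf
                obtain ⟨b, v3, heqs, hsub3, hVI3, hRV3, htrue3, hfalse3⟩ :=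
                  ihds v2 hVI2 hRV2 (hsub2 _ hs0) hreach
                    (fun d' hd' => hds d' (List.mem_cons_of_mem _ hd')) hf2
                refine ⟨b, v3, by rw [scanB_cons_col_false hg hv he hcol heqd]; exact heqs,
                  fun x hx => hsub3 x (hsub2 x hx), hVI3, hRV3, htrue3, ?_⟩
                intro hb
                refine ⟨?_, ?_⟩
                · intro x hx
                  rcases (hfalse3 hb).1 x hx with hx' | hx'
                  · rcases hfalse2 rfl x hx' with hx'' | ⟨hnl, hcl⟩
                    · exact Or.inl hx''
                    · exact Or.inr ⟨hnl, fun n hn hg' hcol' hnz' => hsub3 _ (hcl n hn hg' hcol' hnz')⟩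
                  · exact Or.inr hx'
                · intro d' hd' hg' hcell'
                  rcases List.mem_cons.1 hd' with rfl | hd'
                  · exact hsub3 _ hmem2
                  · exact (hfalse3 hb).2 d' hd' hg' hcell'
            · obtain ⟨b, v2, heq, hsub, hVI2, hRV2, htrue, hfalse⟩ :=
                ihds v hVI hRV hs0 hreach (fun d' hd' => hds d' (List.mem_cons_of_mem _ hd')) hf
              refine ⟨b, v2, by rw [scanB_cons_other hg hv he hcol]; exact heq,
                hsub, hVI2, hRV2, htrue, ?_⟩
              intro hb
              refine ⟨(hfalse hb).1, ?_⟩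
              intro d' hd' hg' hcell'
              rcases List.mem_cons.1 hd' with rfl | hd'
              · rcases hcell' with h0 | ⟨hc0, -⟩
                · exact absurd h0 he
                · exact absurd hc0 hcol
              · exact (hfalse hb).2 d' hd' hg' hcell'
      · obtain ⟨b, v2, heq, hsub, hVI2, hRV2, htrue, hfalse⟩ :=
          ihds v hVI hRV hs0 hreach (fun d' hd' => hds d' (List.mem_cons_of_mem _ hd')) hf
        refine ⟨b, v2, by rw [scanB_cons_skip (fun hh => hg hh.1)]; exact heq,
          hsub, hVI2, hRV2, htrue, ?_⟩
        intro hb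
        refine ⟨(hfalse hb).1, ?_⟩
        intro d' hd' hg' hcell'
        rcases List.mem_cons.1 hd' with rfl | hd'
        · exact absurd hg' hg
        · exact (hfalse hb).2 d' hd' hg' hcell'

-- ---------- characterizations of the two ports ----------

lemma A_char (board : List (List Int)) (i j color : Int) :
    has_liberty board i j color = true ↔ LibP board color (i, j) := by
  have hcard : ((UF (i, j)) \ (PySem.Set.empty : PySem.Set (Int × Int)).toFinset).card ≤ 26 := by
    have := card_UF_le (i, j)
    simpa [PySem.Set.empty] using this
  obtain ⟨b, heq, h1, h2⟩ := loopA_main board color (i, j) 1000 [(i, j)] PySem.Set.empty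
    (by intro x hx; simp only [List.mem_singleton] at hx; subst hx; simp [UF])
    (by intro x hx; simp only [List.mem_singleton] at hx; subst hx; exact ReachA.base)
    (Or.inr ⟨rfl, rfl⟩)
    (by intro x hx; simp [PySem.Set.empty] at hx)
    (by intro x hx; simp only [List.mem_singleton] at hx; subst hx; exact Or.inl rfl)
    (by intro d hd; simp [PySem.Set.empty] at hd)
    (by intro d hd; simp [PySem.Set.empty] at hd)
    ⟨by intro h; simp [PySem.Set.empty] at h, trivial⟩
    (by simp only [measA, List.length_singleton]; omega)
  rw [has_liberty, heq]
  cases b with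
  | true => simpa using h1 rfl
  | false =>
    simp only [Option.getD_some, Bool.false_eq_true, false_iff]
    exact h2 rfl

lemma B_char (board : List (List Int)) (i j color : Int) :
    has_liberty_alt board i j color = true ↔ LibP board color (i, j) := by
  have hcard : ((UF (i, j)) \ (PySem.Set.empty : PySem.Set (Int × Int)).toFinset).card < 100 := by
    have := card_UF_le (i, j)
    have h2 : ((UF (i, j)) \ (PySem.Set.empty : PySem.Set (Int × Int)).toFinset).card ≤ (UF (i, j)).card :=
      Finset.card_le_card (Finset.sdiff_subset)
    omega
  obtain ⟨b, v2, heq, hsub, hmem, hVI2, hRV2, htrue, hfalse⟩ :=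
    (dfsB_scanB_main board color (i, j) 100).1 PySem.Set.empty (i, j)
      (by intro x hx; simp [PySem.Set.empty] at hx)
      (by intro x hx; simp [PySem.Set.empty] at hx)
      (Or.inl rfl) (Or.inl rfl) ReachA.base
      (by simp [PySem.Set.empty]) (by simp [UF]) hcard
  rw [has_liberty_alt, heq]
  cases b with
  | true => simpa using htrue rfl
  | false =>
    simp only [Bool.false_eq_true, false_iff]
    intro hlib
    obtain ⟨cc, nn, hr, hn, hg, he, hns⟩ := hlib
    have hreach : ∀ x, ReachA board color (i, j) x → x ∈ v2 := by
      intro x hx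
      induction hx with
      | base => exact hmem
      | step hr' hn' hg' hcol' hnz' ih' =>
        rcases hfalse rfl _ ih' with h | ⟨-, hcl⟩
        · exact absurd h (by simp [PySem.Set.empty])
        · exact hcl _ hn' hg' hcol' hnz'
    rcases hfalse rfl cc (hreach cc hr) with h | ⟨hnl, -⟩
    · exact absurd h (by simp [PySem.Set.empty])
    · exact hns (hnl nn hn hg he)

-- ===== VERDICT (by name: the statement is the Claim_ definition above) =====
theorem has_liberty_spec : Claim_equal_has_liberty := by
  intro board i j color _ _
  unfold Spec_has_liberty
  have hA := A_char board i j color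
  have hB := B_char board i j color
  cases ha : has_liberty board i j color <;> cases hb : has_liberty_alt board i j color <;> simp_all
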